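-- pv_equiv track=rewrite | github.com/Vinicius-Eira/FIAP | FIAP/Listas & Strings/desafio..py | eh_numero
-- ===== SOURCE A (Python) =====
-- def eh_numero(n: str) -> bool:
--     operadores = '+-'
--     numeros = '0123456789'
--     resultado = True or False # essa variavel não é necessaria mas ajuda na lógica
--                               # para ele retornar verdadeiro ou falso
--
--     # Se a string estiver fazia retorna falso
--     if not n:
--         return False
--
--
--     # Verifica o primeiro caractere: deve ser um operador ou um número
--     if n[0] not in operadores and n[0] not in numeros:
--         return False
--
--        # Verifica os caracteres restantes: devem ser todos números
--     for i in range(1, len(n)):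
--         if n[i] not in numeros:
--             return False
--
--
--      # Se todas as verificações forem passadas, retorna verdadeiro
--     return resultado # poderia trocar pelo True uma das duas formas
-- ===== SOURCE B (Python) =====
-- import re
--
-- _SIGNED_INT = re.compile(r'[-+0-9][0-9]*')
--
-- def eh_numero(n: str) -> bool:
--     return _SIGNED_INT.fullmatch(n) is not None
-- ===== Notes on version B (the rewrite author's own statement) =====
-- stated objective: idiomatic
-- what changed: Replaces the empty-check, first-character membership test and index loop with a single precompiled ASCII regex fullmatch r'[-+0-9][0-9]*'.
import Mathlib
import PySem

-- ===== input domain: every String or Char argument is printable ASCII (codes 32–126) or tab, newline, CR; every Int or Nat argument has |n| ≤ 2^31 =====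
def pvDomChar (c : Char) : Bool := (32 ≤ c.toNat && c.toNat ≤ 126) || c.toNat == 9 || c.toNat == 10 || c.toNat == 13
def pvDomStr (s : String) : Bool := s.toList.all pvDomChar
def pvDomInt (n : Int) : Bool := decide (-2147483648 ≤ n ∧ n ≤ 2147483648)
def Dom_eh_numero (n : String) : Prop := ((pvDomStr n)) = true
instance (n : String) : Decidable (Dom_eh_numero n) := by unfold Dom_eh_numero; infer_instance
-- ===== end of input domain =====

-- B replaces A's empty-check + first-char test + index loop with a single regex fullmatch of [-+0-9][0-9]* (idiomatic; same cost).


-- ===== PORT A =====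
-- operadores = '+-' and numeros = '0123456789' as character lists
def pvOperadores : List Char := ['+', '-']
def pvNumeros : List Char := ['0', '1', '2', '3', '4', '5', '6', '7', '8', '9']

-- the 'for i in range(1, len(n))' loop with its early 'return False'
def ehA_loop (cs : List Char) (i : Nat) : Bool :=
  if h : i < cs.length then
    if pvNumeros.contains cs[i] then ehA_loop cs (i + 1) else false
  else true
termination_by cs.length - i

def eh_numero (n : String) : Bool :=
  let cs := n.toList
  -- resultado = True or False
  let resultado := true
  if cs.isEmpty then false
  else if ¬ pvOperadores.contains (cs.getD 0 ' ') ∧ ¬ pvNumeros.contains (cs.getD 0 ' ') then false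
  else if ehA_loop cs 1 then resultado else false

-- ===== PORT B =====
-- regex fullmatch of [-+0-9][0-9]* ported exactly: one char of the class [-+0-9], then zero or more of [0-9]
def ehB_classHead (c : Char) : Bool := c == '-' || c == '+' || ('0' ≤ c && c ≤ '9')
def ehB_classDigit (c : Char) : Bool := '0' ≤ c && c ≤ '9'

def eh_numero_alt (n : String) : Bool :=
  match n.toList with
  | [] => false
  | c :: cs => ehB_classHead c && cs.all ehB_classDigit

-- ===== PRECONDITION & SPEC =====
def Spec_eh_numero (n : String) (out : Bool) : Prop := out = eh_numero_alt n
instance (n : String) (out : Bool) : Decidable (Spec_eh_numero n out) := by unfold Spec_eh_numero; infer_instance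

-- ===== CLAIM (what is proved, stated in full; the proofs are below) =====
def Claim_equal_eh_numero : Prop := ∀ (n : String), Dom_eh_numero n → Spec_eh_numero n (eh_numero n)

-- ===== LEMMAS AND PROOFS =====

-- A's digit-string membership coincides with B's [0-9] range test
theorem numeros_eq_range (c : Char) : pvNumeros.contains c = ehB_classDigit c := by
  simp only [pvNumeros, ehB_classDigit, List.contains_eq_mem, List.mem_cons, List.not_mem_nil,
    or_false, ← Bool.decide_and]
  rw [decide_eq_decide]
  rcases c with ⟨v, hv⟩
  simp only [Char.ext_iff, Char.le_def, ← UInt32.toNat_inj, UInt32.le_iff_toNat_le]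
  simp only [show ('0':Char).val.toNat = 48 from rfl, show ('1':Char).val.toNat = 49 from rfl,
    show ('2':Char).val.toNat = 50 from rfl, show ('3':Char).val.toNat = 51 from rfl,
    show ('4':Char).val.toNat = 52 from rfl, show ('5':Char).val.toNat = 53 from rfl,
    show ('6':Char).val.toNat = 54 from rfl, show ('7':Char).val.toNat = 55 from rfl,
    show ('8':Char).val.toNat = 56 from rfl, show ('9':Char).val.toNat = 57 from rfl]
  omega

-- A's index loop from i checks exactly that every character after position i is a digit
theorem ehA_loop_eq (cs : List Char) (i : Nat) :
    ehA_loop cs i = (cs.drop i).all ehB_classDigit := by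
  by_cases h : i < cs.length
  · rw [ehA_loop]
    simp only [h, dite_true]
    have hd : cs.drop i = cs[i] :: cs.drop (i + 1) := (List.drop_eq_getElem_cons h)
    rw [hd, List.all_cons, ← numeros_eq_range cs[i]]
    cases hb : pvNumeros.contains cs[i] with
    | false => simp
    | true => simp [ehA_loop_eq cs (i + 1)]
  · rw [ehA_loop]
    have hnil : cs.drop i = [] := List.drop_eq_nil_of_le (Nat.le_of_not_lt h)
    simp [h, hnil]
termination_by cs.length - i

-- ===== VERDICT (by name: the statement is the Claim_ definition above) =====
theorem eh_numero_spec : Claim_equal_eh_numero := by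
  intro n _
  unfold Spec_eh_numero eh_numero eh_numero_alt
  cases hn : n.toList with
  | nil => simp
  | cons c cs =>
    have hhead : (pvOperadores.contains c || pvNumeros.contains c) = ehB_classHead c := by
      rw [numeros_eq_range c]
      simp only [pvOperadores, ehB_classHead, ehB_classDigit, List.contains_eq_mem,
        List.mem_cons, List.not_mem_nil, or_false, Bool.decide_or, Bool.or_assoc]
      cases hp : c == '+' <;> cases hm : c == '-' <;>
        simp_all [beq_iff_eq, Bool.or_comm]
    simp only [List.isEmpty_cons, List.getD_cons_zero, ehA_loop_eq, List.drop_one,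
      List.tail_cons]
    by_cases hop : pvOperadores.contains c = true <;>
      by_cases hnum : pvNumeros.contains c = true <;>
        cases hall : cs.all ehB_classDigit <;>
          simp_all [← hhead]
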